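-- pv_equiv track=rewrite | github.com/aski02/datathon-hrt-challenge | pipeline/strategies/subspace_bagged_downside_ranker_241.py | _sorted_suffix_columns
-- ===== SOURCE A (Python) =====
-- def _sorted_suffix_columns(columns: list[str], prefix: str) -> list[str]:
--     matched = [column for column in columns if column.startswith(prefix)]
--
--     def key_fn(name: str) -> int:
--         suffix = name[len(prefix) :]
--         if suffix.isdigit():
--             return int(suffix)
--         return -1
--
--     return sorted(matched, key=key_fn)
-- ===== SOURCE B (Python) =====
-- def _sorted_suffix_columns(columns: list[str], prefix: str) -> list[str]:
--     non_digit = []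
--     digit = []
--     for column in columns:
--         if column.startswith(prefix):
--             suffix = column[len(prefix):]
--             if suffix.isdigit():
--                 digit.append(column)
--             else:
--                 non_digit.append(column)
--     return non_digit + sorted(digit, key=lambda c: int(c[len(prefix):]))
-- ===== Notes on version B (the rewrite author's own statement) =====
-- stated objective: alternative
-- what changed: Instead of sorting all matched columns with a sentinel key of -1 for non-digit suffixes, B partitions the prefix-filtered columns in one pass into non-digit and digit groups and sorts only the digit group by its integer suffix, concatenating the untouched non-digit group in front.
import Mathlib
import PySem

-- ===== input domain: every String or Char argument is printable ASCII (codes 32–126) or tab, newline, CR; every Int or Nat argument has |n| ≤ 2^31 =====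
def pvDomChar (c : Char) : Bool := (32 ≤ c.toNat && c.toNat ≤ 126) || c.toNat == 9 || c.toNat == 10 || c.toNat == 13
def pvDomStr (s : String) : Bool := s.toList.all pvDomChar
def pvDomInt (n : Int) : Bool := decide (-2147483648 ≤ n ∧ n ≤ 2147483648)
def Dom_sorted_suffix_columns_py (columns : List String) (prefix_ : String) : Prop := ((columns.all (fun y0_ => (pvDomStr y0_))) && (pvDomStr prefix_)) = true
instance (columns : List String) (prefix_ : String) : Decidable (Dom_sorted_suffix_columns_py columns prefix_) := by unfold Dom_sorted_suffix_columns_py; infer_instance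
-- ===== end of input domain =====

-- B partitions the prefix-filtered columns into non-digit and digit suffix groups in one pass and
-- sorts only the digit group by its integer suffix (alternative decomposition; same observable result).


-- ===== PORT A =====
-- key_fn: suffix = name[len(prefix):]; int(suffix) if suffix.isdigit() else -1.
-- int(suffix) is ported as (ofStr? …).getD 0: the isdigit guard guarantees int() succeeds in Python,
-- so the default is unreachable there.
def pvKeyFn (prefix_ : String) (name : String) : Int :=
  let suffix := PySem.Str.slice name (some (PySem.Str.len prefix_)) none
  if PySem.Str.strIsdigit suffix then (PySem.Int.ofStr? suffix).getD 0 else -1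

def sorted_suffix_columns_py (columns : List String) (prefix_ : String) : List String :=
  let matched := columns.filter (fun column => PySem.Str.startswith column prefix_)
  PySem.List.sorted matched (pvKeyFn prefix_)

-- ===== PORT B =====
-- int(c[len(prefix):]) of Source B's sort key; ported as (ofStr? …).getD 0 — B only applies it to
-- columns whose suffix is all digits, where int() succeeds, so the default is unreachable.
def pvKeyInt (prefix_ : String) (c : String) : Int :=
  (PySem.Int.ofStr? (PySem.Str.slice c (some (PySem.Str.len prefix_)) none)).getD 0

def sorted_suffix_columns_py_alt (columns : List String) (prefix_ : String) : List String :=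
  let acc := columns.foldl
    (fun (acc : List String × List String) column =>
      if PySem.Str.startswith column prefix_ then
        let suffix := PySem.Str.slice column (some (PySem.Str.len prefix_)) none
        if PySem.Str.strIsdigit suffix then (acc.1, acc.2 ++ [column])
        else (acc.1 ++ [column], acc.2)
      else acc)
    ([], [])
  acc.1 ++ PySem.List.sorted acc.2 (pvKeyInt prefix_)

-- ===== PRECONDITION & SPEC =====
def Spec_sorted_suffix_columns_py (columns : List String) (prefix_ : String) (out : List String) : Prop := out = sorted_suffix_columns_py_alt columns prefix_
instance (columns : List String) (prefix_ : String) (out : List String) : Decidable (Spec_sorted_suffix_columns_py columns prefix_ out) := by unfold Spec_sorted_suffix_columns_py; infer_instance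

-- ===== CLAIM (what is proved, stated in full; the proofs are below) =====
def Claim_equal_sorted_suffix_columns_py : Prop := ∀ (columns : List String) (prefix_ : String), Dom_sorted_suffix_columns_py columns prefix_ → Spec_sorted_suffix_columns_py columns prefix_ (sorted_suffix_columns_py columns prefix_)

-- ===== LEMMAS AND PROOFS =====

-- a digit character is not int()-leading whitespace
theorem pv_digit_not_space {c : Char} (h : PySem.Chars.isdigit c = true) :
    PySem.Int.isIntSpace c = false := by
  simp [PySem.Chars.isdigit] at h
  simp [PySem.Int.isIntSpace]
  refine ⟨⟨⟨⟨⟨?_, ?_⟩, ?_⟩, ?_⟩, ?_⟩, ?_⟩ <;> rintro rfl <;> revert h <;> decide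

theorem pv_dropWhile_digits {l : List Char} (h : ∀ c ∈ l, PySem.Chars.isdigit c = true) :
    l.dropWhile PySem.Int.isIntSpace = l := by
  cases l with
  | nil => rfl
  | cons c cs => simp [pv_digit_not_space (h c (by simp))]

theorem pv_opt_nonneg (o : Option Nat) :
    0 ≤ (Option.map (fun n : Int => n) (o >>= fun a => pure ((a : Nat) : Int))).getD 0 := by
  cases o <;> simp

-- int(s) of an all-digit string is never negative (even through the port's .getD 0 default)
theorem pv_ofChars?_digits_nonneg (s : List Char) (h : PySem.Chars.strIsdigit s = true) :
    0 ≤ (PySem.Int.ofChars? s).getD 0 := by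
  simp [PySem.Chars.strIsdigit] at h
  obtain ⟨hne, hall⟩ := h
  unfold PySem.Int.ofChars?
  rw [pv_dropWhile_digits hall, pv_dropWhile_digits (by intro c hc; exact hall c (by simpa using hc)),
      List.reverse_reverse]
  cases s with
  | nil => simp at hne
  | cons c cs =>
    have hc : PySem.Chars.isdigit c = true := hall c (by simp)
    have h1 : c ≠ '-' := by rintro rfl; revert hc; decide
    have h2 : c ≠ '+' := by rintro rfl; revert hc; decide
    dsimp only
    split
    · rename_i ds hds; rw [List.cons.injEq] at hds; exact absurd hds.1 h1
    · rename_i ds hds; rw [List.cons.injEq] at hds; exact absurd hds.1 h2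
    · exact pv_opt_nonneg _

-- abbreviations used throughout the proofs
def pvSfx (prefix_ c : String) : String := PySem.Str.slice c (some (PySem.Str.len prefix_)) none
def pvDig (prefix_ c : String) : Bool := PySem.Str.strIsdigit (pvSfx prefix_ c)

theorem pv_key_nondigit {prefix_ c : String} (h : pvDig prefix_ c = false) :
    pvKeyFn prefix_ c = -1 := by
  simp [pvKeyFn, pvDig, pvSfx] at *
  simp [h]

theorem pv_key_digit {prefix_ c : String} (h : pvDig prefix_ c = true) :
    pvKeyFn prefix_ c = pvKeyInt prefix_ c ∧ 0 ≤ pvKeyFn prefix_ c := by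
  simp only [pvDig, pvSfx] at h
  constructor
  · simp only [pvKeyFn, pvKeyInt]
    rw [if_pos h]
  · simp only [pvKeyFn, h, if_true]
    have := pv_ofChars?_digits_nonneg (PySem.Str.slice c (some (PySem.Str.len prefix_)) none).toList
      (by rw [← PySem.Str.strIsdigit_eq]; exact h)
    simpa [PySem.Int.ofStr?] using this

theorem pv_insertBy_append {α : Type} (before : α → α → Bool) (x : α) (N D : List α)
    (h : ∀ y ∈ N, before x y = false) :
    PySem.List.insertBy before x (N ++ D) = N ++ PySem.List.insertBy before x D := by
  induction N with
  | nil => simp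
  | cons n ns ih =>
    simp only [List.cons_append, PySem.List.insertBy, h n (by simp)]
    simp only [Bool.false_eq_true, if_false, List.cons.injEq, true_and]
    exact ih (fun y hy => h y (by simp [hy]))

-- A's stable sort, run over a list whose elements split into key -1 (non-digit suffix) and
-- nonnegative keys (digit suffix), keeps the non-digit elements in front in encounter order.
theorem pv_fold_split (prefix_ : String) (xs : List String) : ∀ (N D : List String),
    (∀ y ∈ N, pvDig prefix_ y = false) → (∀ y ∈ D, pvDig prefix_ y = true) →
    xs.foldl (fun acc x => PySem.List.insertBy
        (fun a b => decide (pvKeyFn prefix_ a < pvKeyFn prefix_ b)) x acc) (N ++ D)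
      = (N ++ xs.filter (fun c => !pvDig prefix_ c)) ++
        (xs.filter (pvDig prefix_)).foldl (fun acc x => PySem.List.insertBy
          (fun a b => decide (pvKeyFn prefix_ a < pvKeyFn prefix_ b)) x acc) D := by
  induction xs with
  | nil => intro N D _ _; simp
  | cons x xs ih =>
    intro N D hN hD
    by_cases hx : pvDig prefix_ x = true
    · have hkx := pv_key_digit hx
      have step : PySem.List.insertBy
          (fun a b => decide (pvKeyFn prefix_ a < pvKeyFn prefix_ b)) x (N ++ D)
          = N ++ PySem.List.insertBy
              (fun a b => decide (pvKeyFn prefix_ a < pvKeyFn prefix_ b)) x D := by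
        apply pv_insertBy_append
        intro y hy
        rw [pv_key_nondigit (hN y hy)]
        simp only [decide_eq_false_iff_not, not_lt]
        omega
      simp only [List.foldl_cons, step]
      rw [ih N _ hN ?hD']
      case hD' =>
        intro y hy
        rw [PySem.List.mem_insertBy] at hy
        rcases hy with rfl | hy
        · exact hx
        · exact hD y hy
      simp [List.filter_cons, hx]
    · have hx' : pvDig prefix_ x = false := by simpa using hx
      have step : PySem.List.insertBy
          (fun a b => decide (pvKeyFn prefix_ a < pvKeyFn prefix_ b)) x (N ++ D)
          = (N ++ [x]) ++ D := by
        rw [pv_insertBy_append]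
        · cases D with
          | nil => simp [PySem.List.insertBy]
          | cons d ds =>
            have hkd := pv_key_digit (hD d (by simp))
            have hcond : (fun a b => decide (pvKeyFn prefix_ a < pvKeyFn prefix_ b)) x d = true := by
              show decide (pvKeyFn prefix_ x < pvKeyFn prefix_ d) = true
              rw [pv_key_nondigit hx']
              simp only [decide_eq_true_eq]
              omega
            simp only [PySem.List.insertBy, hcond, if_true]
            simp
        · intro y hy
          rw [pv_key_nondigit hx', pv_key_nondigit (hN y hy)]
          simp only [decide_eq_false_iff_not, not_lt]
          omega
      simp only [List.foldl_cons, step]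
      rw [ih (N ++ [x]) D ?hN' hD]
      case hN' =>
        intro y hy
        simp at hy
        rcases hy with hy | rfl
        · exact hN y hy
        · exact hx'
      simp [List.filter_cons, hx']

theorem pv_insertBy_congr {α : Type} (k1 k2 : α → Int) (x : α) (acc : List α)
    (hx : k1 x = k2 x) (hacc : ∀ y ∈ acc, k1 y = k2 y) :
    PySem.List.insertBy (fun a b => decide (k1 a < k1 b)) x acc
      = PySem.List.insertBy (fun a b => decide (k2 a < k2 b)) x acc := by
  induction acc with
  | nil => rfl
  | cons y ys ih =>
    simp only [PySem.List.insertBy, hx, hacc y (by simp)]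
    split
    · rfl
    · exact congrArg _ (ih (fun z hz => hacc z (by simp [hz])))

-- stable sort only looks at keys of the list's elements
theorem pv_sorted_congr (k1 k2 : String → Int) (xs : List String)
    (h : ∀ x ∈ xs, k1 x = k2 x) :
    PySem.List.sorted xs k1 = PySem.List.sorted xs k2 := by
  rw [PySem.List.sorted_eq_foldl_insertBy, PySem.List.sorted_eq_foldl_insertBy]
  have main : ∀ (l acc : List String), (∀ x ∈ l, k1 x = k2 x) → (∀ x ∈ acc, k1 x = k2 x) →
      l.foldl (fun acc x => PySem.List.insertBy (fun a b => decide (k1 a < k1 b)) x acc) acc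
        = l.foldl (fun acc x => PySem.List.insertBy (fun a b => decide (k2 a < k2 b)) x acc) acc := by
    intro l
    induction l with
    | nil => intro acc _ _; rfl
    | cons x xs ih =>
      intro acc hl hacc
      simp only [List.foldl_cons]
      rw [pv_insertBy_congr k1 k2 x acc (hl x (by simp)) hacc]
      refine ih _ (fun y hy => hl y (by simp [hy])) ?_
      intro y hy
      rw [PySem.List.mem_insertBy] at hy
      rcases hy with rfl | hy
      · exact hl y (by simp)
      · exact hacc y hy
  exact main xs [] h (by simp)

-- B's single pass builds exactly the two filters, in order
theorem pv_partition_fold (prefix_ : String) (xs : List String) : ∀ (nd dg : List String),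
    xs.foldl
      (fun (acc : List String × List String) column =>
        if PySem.Str.startswith column prefix_ then
          let suffix := PySem.Str.slice column (some (PySem.Str.len prefix_)) none
          if PySem.Str.strIsdigit suffix then (acc.1, acc.2 ++ [column])
          else (acc.1 ++ [column], acc.2)
        else acc) (nd, dg)
    = (nd ++ xs.filter (fun c => PySem.Str.startswith c prefix_ && !pvDig prefix_ c),
       dg ++ xs.filter (fun c => PySem.Str.startswith c prefix_ && pvDig prefix_ c)) := by
  induction xs with
  | nil => intro nd dg; simp
  | cons x xs ih =>
    intro nd dg
    simp only [List.foldl_cons, List.filter_cons]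
    by_cases hs : PySem.Str.startswith x prefix_ = true
    · by_cases hd : pvDig prefix_ x = true
      · have : PySem.Str.strIsdigit (PySem.Str.slice x (some (PySem.Str.len prefix_)) none) = true := hd
        simp only [hs, if_true, this, hd]
        rw [ih]
        simp [hs, hd]
      · have hd' : pvDig prefix_ x = false := by simpa using hd
        have : PySem.Str.strIsdigit (PySem.Str.slice x (some (PySem.Str.len prefix_)) none) = false := hd'
        simp only [hs, if_true, this, Bool.false_eq_true, if_false]
        rw [ih]
        simp [hs, hd']
    · have hs' : PySem.Str.startswith x prefix_ = false := by simpa using hs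
      simp only [hs', Bool.false_eq_true, if_false]
      rw [ih]
      simp [hs']

-- ===== VERDICT (by name: the statement is the Claim_ definition above) =====
set_option maxHeartbeats 1000000 in
theorem sorted_suffix_columns_py_spec : Claim_equal_sorted_suffix_columns_py := by
  intro columns prefix_ _
  unfold Spec_sorted_suffix_columns_py sorted_suffix_columns_py sorted_suffix_columns_py_alt
  rw [pv_partition_fold]
  simp only [List.nil_append]
  rw [PySem.List.sorted_eq_foldl_insertBy]
  have := pv_fold_split prefix_
    (columns.filter (fun column => PySem.Str.startswith column prefix_)) [] []
    (by simp) (by simp)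
  simp only [List.nil_append, List.append_nil] at this
  rw [this]
  rw [List.filter_filter, List.filter_filter]
  rw [← PySem.List.sorted_eq_foldl_insertBy]
  rw [pv_sorted_congr (pvKeyFn prefix_) (pvKeyInt prefix_)]
  · have e1 : List.filter (fun a => !pvDig prefix_ a && PySem.Str.startswith a prefix_) columns
        = List.filter (fun c => PySem.Str.startswith c prefix_ && !pvDig prefix_ c) columns :=
      List.filter_congr (fun x _ => Bool.and_comm _ _)
    have e2 : List.filter (fun a => pvDig prefix_ a && PySem.Str.startswith a prefix_) columns
        = List.filter (fun c => PySem.Str.startswith c prefix_ && pvDig prefix_ c) columns :=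
      List.filter_congr (fun x _ => Bool.and_comm _ _)
    rw [e1, e2]
  · intro x hx
    simp only [List.mem_filter, Bool.and_eq_true] at hx
    exact (pv_key_digit hx.2.1).1
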